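-- pv_equiv track=rewrite | github.com/Gygrus/WDI-ASD-course-Python | Semestr I/zestaw_3/cw19.py | cw19
-- ===== SOURCE A (Python) =====
-- def cw19(t):
--     k = len(t)
--     i = 0
--     biggest = 0
--     result = []
--     while k > 0:
--         i = 0
--         while i != k:
--             new = t[i:k]
--             temp_length = len(new)
--             index_sum = sum(list(range(i, k)))
--             if sum(new) == index_sum:
--                 tab = [0]
--                 z = True
--                 for x in new:
--                     if x < tab[-1]:
--                         z = False
--                         break
--                     tab.append(x)
--                 if z and temp_length > biggest:
--                     biggest = temp_length
--                     result.append(new)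
--
--
--             i += 1
--         k -= 1
--     return biggest, result
-- ===== SOURCE B (Python) =====
-- def cw19(t):
--     # Same scan order as the cubic version, but each candidate is checked in O(1):
--     # Q[j] = sum of (t[m] - m) for m < j, so sum(t[i:k]) == sum(range(i,k)) iff Q[i] == Q[k];
--     # run[i] = largest j such that t[i:j] is non-decreasing, so the monotone test is k <= run[i].
--     n = len(t)
--     Q = [0]
--     for j, x in enumerate(t):
--         Q.append(Q[-1] + x - j)
--     run = [n]
--     for i in range(n - 1, -1, -1):
--         run.insert(0, run[0] if i + 1 < n and t[i] <= t[i + 1] else i + 1)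
--     biggest = 0
--     result = []
--     for k in range(n, 0, -1):
--         for i in range(k):
--             if Q[i] == Q[k] and t[i] >= 0 and k <= run[i] and k - i > biggest:
--                 biggest = k - i
--                 result.append(t[i:k])
--     return biggest, result
-- ===== Notes on version B (the rewrite author's own statement) =====
-- stated objective: faster
-- what changed: B keeps A's exact scan order (k descending, i ascending) but replaces A's O(n) per-candidate work (building the slice, summing it, summing range(i,k), and rescanning for monotonicity) with O(1) checks against a precomputed shifted prefix-sum table Q (Q[i]==Q[k] iff sum(t[i:k])==sum(range(i,k))) and a precomputed non-decreasing run-endpoint table.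
import Mathlib
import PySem

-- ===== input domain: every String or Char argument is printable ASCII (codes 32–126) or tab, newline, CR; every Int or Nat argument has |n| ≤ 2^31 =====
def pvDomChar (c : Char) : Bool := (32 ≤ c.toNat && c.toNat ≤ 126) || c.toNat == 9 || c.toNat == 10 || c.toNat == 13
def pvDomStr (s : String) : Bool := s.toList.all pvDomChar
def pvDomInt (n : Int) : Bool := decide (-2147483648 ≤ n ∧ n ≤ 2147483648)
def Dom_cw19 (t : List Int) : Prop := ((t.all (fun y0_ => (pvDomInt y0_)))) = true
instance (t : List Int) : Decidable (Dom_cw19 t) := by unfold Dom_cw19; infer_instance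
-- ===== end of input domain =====

-- B replaces A's O(n) per-candidate sum and monotonicity re-checks by shifted prefix sums
-- (Q) and precomputed non-decreasing run endpoints (run), keeping A's exact scan order.

-- ===== PORT A =====
-- A's inner 'for x in new' loop: tab starts as [0], each kept x is appended, tab[-1] is read.
def cw19Tab (tab : List Int) : List Int → Bool
  | [] => true
  | x :: xs =>
    if x < PySem.List.pyGetD tab (-1) 0 then false else cw19Tab (tab ++ [x]) xs

def cw19 (t : List Int) : Int × List (List Int) :=
  (PySem.List.pyRange (PySem.List.len t) 0 (-1)).foldl
    (fun st k =>
      (PySem.List.pyRange 0 k 1).foldl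
        (fun st i =>
          let new := PySem.List.slice t (some i) (some k)
          let temp_length := PySem.List.len new
          let index_sum := (PySem.List.pyRange i k 1).sum
          if new.sum = index_sum then
            if cw19Tab [0] new = true ∧ temp_length > st.1 then
              (temp_length, st.2 ++ [new])
            else st
          else st)
        st)
    (0, [])

-- ===== PORT B =====
def cw19_alt (t : List Int) : Int × List (List Int) :=
  let n := PySem.List.len t
  let Q : List Int := (PySem.List.enumerate t 0).foldl
      (fun Q jx => Q ++ [PySem.List.pyGetD Q (-1) 0 + jx.2 - jx.1]) [0]
  -- run.insert(0, x) on a list is cons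
  let run : List Int := (PySem.List.pyRange (n - 1) (-1) (-1)).foldl
      (fun run i =>
        (if i + 1 < n ∧ PySem.List.pyGetD t i 0 ≤ PySem.List.pyGetD t (i + 1) 0
         then PySem.List.pyGetD run 0 0 else i + 1) :: run)
      [n]
  (PySem.List.pyRange n 0 (-1)).foldl
    (fun st k =>
      (PySem.List.pyRange 0 k 1).foldl
        (fun st i =>
          if PySem.List.pyGetD Q i 0 = PySem.List.pyGetD Q k 0 ∧
             0 ≤ PySem.List.pyGetD t i 0 ∧
             k ≤ PySem.List.pyGetD run i 0 ∧ k - i > st.1 then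
            (k - i, st.2 ++ [PySem.List.slice t (some i) (some k)])
          else st)
        st)
    (0, [])

-- ===== PRECONDITION & SPEC =====
def Spec_cw19 (t : List Int) (out : Int × List (List Int)) : Prop := out = cw19_alt t
instance (t : List Int) (out : Int × List (List Int)) : Decidable (Spec_cw19 t out) := by unfold Spec_cw19; infer_instance

-- ===== CLAIM (what is proved, stated in full; the proofs are below) =====
def Claim_equal_cw19 : Prop := ∀ (t : List Int), Dom_cw19 t → Spec_cw19 t (cw19 t)

-- ===== LEMMAS AND PROOFS =====

-- last-value view of A's tab loop
def chainB (c : Int) : List Int → Bool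
  | [] => true
  | x :: xs => if x < c then false else chainB x xs

-- the values B appends to Q: running sum of t[m] - m
def qTail : List Int → Int → Int → List Int
  | [], _, _ => []
  | x :: xs, s, c => (c + x - s) :: qTail xs (s + 1) (c + x - s)

-- the run endpoint B precomputes: largest j with t[i:j] non-decreasing
def rFun (t : List Int) (i : Nat) : Int :=
  if i + 1 < t.length then
    (if t.getD i 0 ≤ t.getD (i + 1) 0 then rFun t (i + 1) else (i : Int) + 1)
  else (i : Int) + 1
termination_by t.length - i

lemma cw19Tab_eq (l : List Int) : ∀ (tab : List Int) (c : Int),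
    cw19Tab (tab ++ [c]) l = chainB c l := by
  induction l with
  | nil => intro tab c; rfl
  | cons x xs ih =>
    intro tab c
    simp only [cw19Tab, chainB, PySem.List.pyGetD_neg_one_append_singleton]
    split
    · rfl
    · have := ih (tab ++ [c]) x
      simpa using this

lemma buildQ (u : List Int) : ∀ (s c : Int) (acc : List Int), acc.getLast? = some c →
    (PySem.List.enumerate u s).foldl
      (fun Q jx => Q ++ [PySem.List.pyGetD Q (-1) 0 + jx.2 - jx.1]) acc
    = acc ++ qTail u s c := by
  induction u with
  | nil => intro s c acc h; simp [PySem.List.enumerate, qTail]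
  | cons x xs ih =>
    intro s c acc h
    have hne : acc ≠ [] := by intro he; simp [he] at h
    have hlast : PySem.List.pyGetD acc (-1) 0 = c := by
      rw [PySem.List.pyGetD_neg_one acc 0 hne]
      rw [List.getLast?_eq_some_getLast hne] at h
      exact Option.some.inj h
    have hstep : PySem.List.enumerate (x :: xs) s = (s, x) :: PySem.List.enumerate xs (s + 1) := rfl
    rw [hstep, List.foldl_cons]
    simp only [hlast]
    rw [ih (s + 1) (c + x - s) (acc ++ [c + x - s]) (by simp)]
    simp [qTail]

lemma qTail_getD (u : List Int) : ∀ (j : Nat) (s c : Int), j ≤ u.length →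
    (c :: qTail u s c).getD j 0
      = c + (u.take j).sum - (PySem.List.pyRange s (s + (j : Int)) 1).sum := by
  induction u with
  | nil =>
    intro j s c h
    have hj : j = 0 := by simpa using h
    subst hj
    simp [qTail, PySem.List.pyRange_one_eq_nil]
  | cons x xs ih =>
    intro j s c h
    cases j with
    | zero => simp [PySem.List.pyRange_one_eq_nil]
    | succ j =>
      simp only [qTail, List.getD_cons_succ]
      have := ih j (s + 1) (c + x - s) (by simpa using h)
      rw [this]
      have hr : PySem.List.pyRange s (s + ((j : Int) + 1)) 1
          = s :: PySem.List.pyRange (s + 1) (s + ((j : Int) + 1)) 1 := by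
        rw [PySem.List.pyRange_one_cons]; omega
      push_cast
      rw [show s + ((j:Int) + 1) = (s+1) + (j:Int) by ring] at hr ⊢
      rw [hr]
      simp [List.sum_cons]
      ring

lemma rFun_lb (t : List Int) (i : Nat) : (i : Int) + 1 ≤ rFun t i := by
  induction hd : t.length - i generalizing i with
  | zero =>
    rw [rFun]
    have h0 : ¬ i + 1 < t.length := by omega
    simp only [if_neg h0, le_refl]
  | succ d ih =>
    rw [rFun]
    split
    · split
      · have := ih (i + 1) (by omega); push_cast at this ⊢; omega
      · omega
    · omega

lemma buildRun (t : List Int) : ∀ (m : Nat), m ≤ t.length →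
    (PySem.List.pyRange ((m : Int) - 1) (-1) (-1)).foldl
      (fun run i =>
        (if i + 1 < (t.length : Int) ∧
            PySem.List.pyGetD t i 0 ≤ PySem.List.pyGetD t (i + 1) 0
         then PySem.List.pyGetD run 0 0 else i + 1) :: run)
      ((List.range' m (t.length - m)).map (rFun t) ++ [(t.length : Int)])
    = (List.range' 0 t.length).map (rFun t) ++ [(t.length : Int)] := by
  intro m
  induction m with
  | zero =>
    intro _
    rw [PySem.List.pyRange_neg_one_eq_nil (by omega)]
    simp
  | succ m ih =>
    intro hm
    have hcons : PySem.List.pyRange ((m : Int) + 1 - 1) (-1) (-1)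
        = (m : Int) :: PySem.List.pyRange ((m : Int) - 1) (-1) (-1) := by
      rw [show ((m : Int) + 1 - 1) = (m : Int) by ring, PySem.List.pyRange_neg_one_cons (by omega)]
    push_cast
    rw [hcons, List.foldl_cons]
    have hstep :
        (if (m : Int) + 1 < (t.length : Int) ∧
            PySem.List.pyGetD t (m : Int) 0 ≤ PySem.List.pyGetD t ((m : Int) + 1) 0
         then PySem.List.pyGetD ((List.range' (m+1) (t.length - (m+1))).map (rFun t) ++ [(t.length : Int)]) 0 0
         else (m : Int) + 1)
        = rFun t m := by
      rw [rFun]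
      by_cases h1 : m + 1 < t.length
      · have h1' : ((m : Int) + 1 < (t.length : Int)) := by omega
        have hr : List.range' (m+1) (t.length - (m+1)) = (m+1) :: List.range' (m+2) (t.length - (m+2)) := by
          rw [show t.length - (m+1) = (t.length - (m+2)) + 1 by omega, List.range'_succ]
        rw [hr]
        have hget : PySem.List.pyGetD t (m : Int) 0 = t.getD m 0 :=
          PySem.List.pyGetD_natCast t m 0
        have hget1 : PySem.List.pyGetD t ((m : Int) + 1) 0 = t.getD (m+1) 0 := by
          rw [show ((m : Int) + 1) = ((m + 1 : Nat) : Int) by omega]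
          exact PySem.List.pyGetD_natCast t (m+1) 0
        simp only [hget, hget1, h1, h1', true_and, List.map_cons, List.cons_append,
          PySem.List.pyGetD_zero_cons]
        split <;> rfl
      · have h1' : ¬ ((m : Int) + 1 < (t.length : Int)) := by omega
        simp [h1, h1']
    rw [hstep]
    have hsplit : (rFun t m) :: ((List.range' (m+1) (t.length - (m+1))).map (rFun t) ++ [(t.length : Int)])
        = (List.range' m (t.length - m)).map (rFun t) ++ [(t.length : Int)] := by
      have : List.range' m (t.length - m) = m :: List.range' (m+1) (t.length - (m+1)) := by
        rw [show t.length - m = (t.length - (m+1)) + 1 by omega, List.range'_succ]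
      rw [this]; simp
    rw [hsplit]
    exact ih (by omega)

lemma drop_take_cons (t : List Int) (j m : Nat) (hj : j < t.length) (hm : 0 < m) :
    (t.drop j).take m = t.getD j 0 :: (t.drop (j + 1)).take (m - 1) := by
  cases m with
  | zero => omega
  | succ m =>
    rw [List.drop_eq_getElem_cons hj, List.take_succ_cons, List.getD_eq_getElem?_getD,
      List.getElem?_eq_getElem hj]
    simp

lemma chainB_run (t : List Int) : ∀ (d i k : Nat), k - i ≤ d → i < k → k ≤ t.length →
    (chainB (t.getD i 0) ((t.drop (i + 1)).take (k - i - 1)) = true ↔ (k : Int) ≤ rFun t i) := by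
  intro d
  induction d with
  | zero => intro i k h1 h2 _; omega
  | succ d ih =>
    intro i k h1 h2 h3
    by_cases hk : k = i + 1
    · subst hk
      rw [show (i + 1) - i - 1 = 0 by omega]
      simp only [List.take_zero]
      constructor
      · intro _; exact_mod_cast rFun_lb t i
      · intro _; rfl
    · have hik : i + 2 ≤ k := by omega
      have hi1 : i + 1 < t.length := by omega
      rw [drop_take_cons t (i+1) (k - i - 1) hi1 (by omega)]
      rw [rFun, if_pos hi1]
      simp only [chainB]
      by_cases hle : t.getD i 0 ≤ t.getD (i + 1) 0
      · rw [if_pos hle, if_neg (by omega)]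
        have := ih (i+1) k (by omega) (by omega) h3
        rw [show k - i - 1 - 1 = k - (i+1) - 1 by omega]
        exact this
      · rw [if_neg hle, if_pos (by omega)]
        constructor
        · intro h; exact absurd h (by simp)
        · intro h; exfalso; omega

lemma qListGetD (t : List Int) (j : Nat) (hn : j ≤ t.length) :
    PySem.List.pyGetD (0 :: qTail t 0 0) ((j : Nat) : Int) 0
      = (t.take j).sum - (PySem.List.pyRange 0 ((j : Nat) : Int) 1).sum := by
  rw [PySem.List.pyGetD_natCast, qTail_getD t j 0 0 hn]
  simp

lemma runGetD (t : List Int) (i : Nat) (hn : i < t.length) :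
    PySem.List.pyGetD ((List.range' 0 t.length).map (rFun t) ++ [(t.length : Int)]) ((i : Nat) : Int) 0
      = rFun t i := by
  rw [PySem.List.pyGetD_natCast]
  rw [List.getD_append _ _ _ _ (by simpa using hn)]
  rw [List.getD_eq_getElem _ _ (by simpa using hn)]
  simp [← List.range_eq_range']

lemma tGetD (t : List Int) (i : Nat) :
    PySem.List.pyGetD t ((i : Nat) : Int) 0 = t.getD i 0 := by
  rw [PySem.List.pyGetD_natCast]

lemma cell_eq (t : List Int) (st : Int × List (List Int)) (k i : Int)
    (hk0 : 0 < k) (hkn : k ≤ (t.length : Int)) (hi0 : 0 ≤ i) (hik : i < k) :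
    (let new := PySem.List.slice t (some i) (some k)
     let temp_length := PySem.List.len new
     let index_sum := (PySem.List.pyRange i k 1).sum
     if new.sum = index_sum then
       if cw19Tab [0] new = true ∧ temp_length > st.1 then
         (temp_length, st.2 ++ [new])
       else st
     else st)
    = (if PySem.List.pyGetD (0 :: qTail t 0 0) i 0 = PySem.List.pyGetD (0 :: qTail t 0 0) k 0 ∧
          0 ≤ PySem.List.pyGetD t i 0 ∧
          k ≤ PySem.List.pyGetD ((List.range' 0 t.length).map (rFun t) ++ [(t.length : Int)]) i 0 ∧
          k - i > st.1 then
         (k - i, st.2 ++ [PySem.List.slice t (some i) (some k)])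
       else st) := by
  have ha : ((i.toNat : Nat) : Int) = i := by omega
  have hb : ((k.toNat : Nat) : Int) = k := by omega
  have hab : i.toNat < k.toNat := by omega
  have hbn : k.toNat ≤ t.length := by omega
  have hslice : PySem.List.slice t (some i) (some k)
      = (t.drop i.toNat).take (k.toNat - i.toNat) :=
    PySem.List.slice_toNat t hi0 (by omega)
  have hlen : PySem.List.len (PySem.List.slice t (some i) (some k)) = k - i := by
    rw [PySem.List.len_eq, hslice]
    simp only [List.length_take, List.length_drop]
    omega
  -- sum condition
  have htake : (t.take k.toNat).sum
      = (t.take i.toNat).sum + ((t.drop i.toNat).take (k.toNat - i.toNat)).sum := by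
    conv_lhs => rw [show k.toNat = i.toNat + (k.toNat - i.toNat) by omega]
    rw [List.take_add, List.sum_append]
  have hrange : (PySem.List.pyRange 0 k 1).sum
      = (PySem.List.pyRange 0 i 1).sum + (PySem.List.pyRange i k 1).sum := by
    rw [PySem.List.pyRange_one_append 0 i k hi0 (by omega), List.sum_append]
  have hQ : (PySem.List.pyGetD (0 :: qTail t 0 0) i 0 = PySem.List.pyGetD (0 :: qTail t 0 0) k 0)
      ↔ ((PySem.List.slice t (some i) (some k)).sum = (PySem.List.pyRange i k 1).sum) := by
    conv_lhs => rw [← ha, ← hb]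
    rw [qListGetD t i.toNat (by omega), qListGetD t k.toNat (by omega), hslice, ha, hb]
    omega
  -- monotone condition
  have hsl2 : (t.drop i.toNat).take (k.toNat - i.toNat)
      = t.getD i.toNat 0 :: (t.drop (i.toNat + 1)).take (k.toNat - i.toNat - 1) :=
    drop_take_cons t i.toNat _ (by omega) (by omega)
  have hTab : (cw19Tab [0] (PySem.List.slice t (some i) (some k)) = true)
      ↔ (0 ≤ PySem.List.pyGetD t i 0 ∧
         k ≤ PySem.List.pyGetD ((List.range' 0 t.length).map (rFun t) ++ [(t.length : Int)]) i 0) := by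
    conv_rhs => rw [← ha]
    rw [runGetD t i.toNat (by omega), tGetD t i.toNat]
    have h0tab : ∀ l : List Int, cw19Tab [0] l = chainB 0 l := by
      intro l
      simpa using cw19Tab_eq l [] 0
    rw [h0tab, hslice, hsl2]
    simp only [chainB]
    by_cases hneg : t.getD i.toNat 0 < 0
    · rw [if_pos hneg]
      constructor
      · intro h; exact absurd h (by simp)
      · intro h; omega
    · rw [if_neg hneg]
      have hcr := chainB_run t (k.toNat - i.toNat) i.toNat k.toNat (by omega) hab hbn
      rw [hcr, hb]
      constructor
      · intro h; exact ⟨by omega, h⟩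
      · intro h; exact h.2
  -- assemble
  simp only []
  rw [hlen]
  by_cases h1 : (PySem.List.slice t (some i) (some k)).sum = (PySem.List.pyRange i k 1).sum
  · rw [if_pos h1]
    by_cases h2 : cw19Tab [0] (PySem.List.slice t (some i) (some k)) = true
    · by_cases h3 : k - i > st.1
      · rw [if_pos ⟨h2, h3⟩, if_pos ⟨hQ.mpr h1, (hTab.mp h2).1, (hTab.mp h2).2, h3⟩]
      · rw [if_neg (by tauto), if_neg (by tauto)]
    · rw [if_neg (by tauto)]
      rw [if_neg (by intro hc; exact h2 (hTab.mpr ⟨hc.2.1, hc.2.2.1⟩))]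
  · rw [if_neg h1, if_neg (by intro hc; exact h1 (hQ.mp hc.1))]

theorem cw19_eq_alt (t : List Int) : cw19 t = cw19_alt t := by
  have hQ : (PySem.List.enumerate t 0).foldl
      (fun Q jx => Q ++ [PySem.List.pyGetD Q (-1) 0 + jx.2 - jx.1]) [0]
      = 0 :: qTail t 0 0 := by
    simpa using buildQ t 0 0 [0] rfl
  have hRun : (PySem.List.pyRange (PySem.List.len t - 1) (-1) (-1)).foldl
      (fun run i =>
        (if i + 1 < PySem.List.len t ∧
            PySem.List.pyGetD t i 0 ≤ PySem.List.pyGetD t (i + 1) 0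
         then PySem.List.pyGetD run 0 0 else i + 1) :: run)
      [PySem.List.len t]
      = (List.range' 0 t.length).map (rFun t) ++ [(t.length : Int)] := by
    have h := buildRun t t.length (le_refl _)
    simp only [Nat.sub_self, List.range'_zero, List.map_nil, List.nil_append] at h
    simpa only [PySem.List.len_eq] using h
  simp only [cw19, cw19_alt]
  apply PySem.List.foldl_congr_mem
  intro st k hk
  have hkm := PySem.List.mem_pyRange_neg_one.mp hk
  rw [PySem.List.len_eq] at hkm
  apply PySem.List.foldl_congr_mem
  intro st' i hi
  have him := PySem.List.mem_pyRange_one.mp hi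
  rw [hQ, hRun]
  exact cell_eq t st' k i (by omega) (by omega) (by omega) (by omega)

-- ===== VERDICT (by name: the statement is the Claim_ definition above) =====
theorem cw19_spec : Claim_equal_cw19 := by
  intro t _
  unfold Spec_cw19
  exact cw19_eq_alt t
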